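-- pv_equiv track=rewrite | github.com/kitaharalab/MusicLoopSequencer | server/app/app.py | fix_Auto_Hmm
-- ===== SOURCE A (Python) =====
-- fix_len = 4
--
-- def fix_Auto_Hmm(hmm_array, excitement_array, section_array):
--     """セクションに合わせて揃える"""
--     pre_section = -1
--     for i in range(len(hmm_array)):
--         if pre_section != section_array[i] or i % fix_len == 0:
--             h = hmm_array[i]
--             e = excitement_array[i]
--         hmm_array[i] = h
--         excitement_array[i] = e
--         pre_section = section_array[i]
--
--     return hmm_array, excitement_array
-- ===== SOURCE B (Python) =====
-- fix_len = 4
--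
-- def fix_Auto_Hmm(hmm_array, excitement_array, section_array):
--     """セクションに合わせて揃える"""
--     n = len(hmm_array)
--     # stage 1: for each position, the index of the block start it belongs to
--     anchors = []
--     for i in range(n):
--         if i % fix_len == 0 or section_array[i] != section_array[i - 1]:
--             anchors.append(i)
--         else:
--             anchors.append(anchors[-1])
--     # stage 2: gather the original values at the anchor indices, write them back in place
--     hmm_array[:] = [hmm_array[a] for a in anchors]
--     excitement_array[:n] = [excitement_array[a] for a in anchors]
--     return hmm_array, excitement_array
-- ===== Notes on version B (the rewrite author's own statement) =====
-- stated objective: alternative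
-- what changed: Replaces A's single stateful pass (carrying pre_section and the held h/e values across iterations) with a staged index-map-then-gather algorithm: first compute an anchor array mapping each position to its block-start index, then rebuild both arrays by gathering the original values at those anchors.
import Mathlib
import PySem

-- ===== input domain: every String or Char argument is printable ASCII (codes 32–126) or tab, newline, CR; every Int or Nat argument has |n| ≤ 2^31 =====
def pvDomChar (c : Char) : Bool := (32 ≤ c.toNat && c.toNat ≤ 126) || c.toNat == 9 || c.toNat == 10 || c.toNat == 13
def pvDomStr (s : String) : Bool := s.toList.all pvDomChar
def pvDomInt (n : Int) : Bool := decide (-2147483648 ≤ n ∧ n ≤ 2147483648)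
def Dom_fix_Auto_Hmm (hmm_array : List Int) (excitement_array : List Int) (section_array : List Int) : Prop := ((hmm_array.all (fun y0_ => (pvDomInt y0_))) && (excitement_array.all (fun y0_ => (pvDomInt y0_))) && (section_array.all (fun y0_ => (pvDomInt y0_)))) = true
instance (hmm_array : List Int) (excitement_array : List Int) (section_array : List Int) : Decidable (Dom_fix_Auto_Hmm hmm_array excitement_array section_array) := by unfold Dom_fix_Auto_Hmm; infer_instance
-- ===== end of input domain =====

-- B replaces A's single stateful fill pass with a staged index-map-then-gather algorithm
-- (anchor array first, then a gather of the original values); equal return values on Pre_.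
-- Both Pythons mutate hmm_array/excitement_array in place and return the same two objects.


-- ===== PORT A =====
-- loop state: (pre_section, h, e, hmm_array, excitement_array).
-- indexing uses getD 0; inside Pre_ every index is in range, so this matches Python
-- exactly on the admitted inputs (Python raises IndexError outside Pre_).
def fixStepA (section_array : List Int)
    (s : Int × Int × Int × List Int × List Int) (i : Nat) :
    Int × Int × Int × List Int × List Int :=
  let pre := s.1; let h := s.2.1; let e := s.2.2.1
  let hm := s.2.2.2.1; let ex := s.2.2.2.2
  let he : Int × Int :=
    if pre ≠ section_array.getD i 0 ∨ i % 4 = 0 then (hm.getD i 0, ex.getD i 0) else (h, e)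
  (section_array.getD i 0, he.1, he.2, hm.set i he.1, ex.set i he.2)

def fix_Auto_Hmm (hmm_array : List Int) (excitement_array : List Int) (section_array : List Int) : List Int × List Int :=
  (((List.range hmm_array.length).foldl (fixStepA section_array)
      (-1, 0, 0, hmm_array, excitement_array)).2.2.2.1,
   ((List.range hmm_array.length).foldl (fixStepA section_array)
      (-1, 0, 0, hmm_array, excitement_array)).2.2.2.2)

-- ===== PORT B =====
-- stage 1 of Source B: the anchors list, built by appending (anchors[-1] = getD (length-1)).
def bAnchors (section_array : List Int) (n : Nat) : List Nat :=
  (List.range n).foldl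
    (fun acc i =>
      acc ++ [if i % 4 = 0 ∨ section_array.getD i 0 ≠ section_array.getD (i - 1) 0
              then i else acc.getD (acc.length - 1) 0]) []

-- stage 2: gather original values at the anchors; the slice assignments
-- hmm_array[:] = … and excitement_array[:n] = … become the lists returned here.
def fix_Auto_Hmm_alt (hmm_array : List Int) (excitement_array : List Int) (section_array : List Int) : List Int × List Int :=
  ((bAnchors section_array hmm_array.length).map (fun a => hmm_array.getD a 0),
   (bAnchors section_array hmm_array.length).map (fun a => excitement_array.getD a 0) ++
     excitement_array.drop hmm_array.length)

-- ===== PRECONDITION & SPEC =====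
-- Pre_ excludes exactly the inputs where Python A raises IndexError:
-- section_array or excitement_array shorter than hmm_array.
def Pre_fix_Auto_Hmm (hmm_array : List Int) (excitement_array : List Int) (section_array : List Int) : Prop :=
  hmm_array.length ≤ excitement_array.length ∧ hmm_array.length ≤ section_array.length
instance (hmm_array : List Int) (excitement_array : List Int) (section_array : List Int) : Decidable (Pre_fix_Auto_Hmm hmm_array excitement_array section_array) := by unfold Pre_fix_Auto_Hmm; infer_instance

def pvWitness_fix_Auto_Hmm : List Int × List Int × List Int :=
  ([1, 2, 3, 4, 5], [9, 8, 7, 6, 5], [0, 0, 1, 1, 1])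

def Spec_fix_Auto_Hmm (hmm_array : List Int) (excitement_array : List Int) (section_array : List Int) (out : List Int × List Int) : Prop := out = fix_Auto_Hmm_alt hmm_array excitement_array section_array
instance (hmm_array : List Int) (excitement_array : List Int) (section_array : List Int) (out : List Int × List Int) : Decidable (Spec_fix_Auto_Hmm hmm_array excitement_array section_array out) := by unfold Spec_fix_Auto_Hmm; infer_instance

-- ===== CLAIM (what is proved, stated in full; the proofs are below) =====
def Claim_equal_fix_Auto_Hmm : Prop := ∀ (hmm_array : List Int) (excitement_array : List Int) (section_array : List Int), Dom_fix_Auto_Hmm hmm_array excitement_array section_array → Pre_fix_Auto_Hmm hmm_array excitement_array section_array → Spec_fix_Auto_Hmm hmm_array excitement_array section_array (fix_Auto_Hmm hmm_array excitement_array section_array)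

-- ===== LEMMAS AND PROOFS =====

-- proof-only functional anchor: block-start index of position i.
def anchor (sec : List Int) : Nat → Nat
  | 0 => 0
  | i + 1 => if (i + 1) % 4 = 0 ∨ sec.getD (i + 1) 0 ≠ sec.getD i 0 then i + 1 else anchor sec i

theorem bAnchors_eq (sec : List Int) : ∀ n, bAnchors sec n = (List.range n).map (anchor sec) := by
  intro n
  induction n with
  | zero => simp [bAnchors]
  | succ k ih =>
    unfold bAnchors at ih ⊢
    rw [List.range_succ, List.foldl_append, List.map_append, ih]
    simp only [List.foldl_cons, List.foldl_nil, List.map_cons, List.map_nil,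
      List.append_cancel_left_eq, List.cons.injEq, and_true]
    cases k with
    | zero => simp [anchor]
    | succ m =>
      rw [anchor]
      simp only [Nat.add_sub_cancel]
      by_cases hc : (m + 1) % 4 = 0 ∨ sec.getD (m + 1) 0 ≠ sec.getD m 0
      · rw [if_pos hc, if_pos hc]
      · rw [if_neg hc, if_neg hc]
        simp [List.getD_eq_getElem?_getD]

theorem getD_set (l : List Int) (k : Nat) (v : Int) (j : Nat) :
    (l.set k v).getD j 0 = if k = j ∧ k < l.length then v else l.getD j 0 := by
  rcases eq_or_ne k j with rfl | hne
  · by_cases hk : k < l.length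
    · rw [if_pos ⟨rfl, hk⟩]
      simp [List.getD_eq_getElem?_getD, hk]
    · rw [if_neg (by tauto)]
      simp [List.getD_eq_getElem?_getD, hk]
  · rw [if_neg (by tauto)]
    simp [List.getD_eq_getElem?_getD, hne]

-- A's loop invariant: after i iterations the carried pair is the value at anchor (i-1),
-- positions < i hold the gathered values, positions ≥ i are untouched.
theorem A_inv (hm ex sec : List Int) (hex : hm.length ≤ ex.length) :
    ∀ i, i ≤ hm.length →
      (let s := (List.range i).foldl (fixStepA sec) (-1, 0, 0, hm, ex);
       (1 ≤ i → s.1 = sec.getD (i - 1) 0 ∧ s.2.1 = hm.getD (anchor sec (i - 1)) 0 ∧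
                s.2.2.1 = ex.getD (anchor sec (i - 1)) 0) ∧
       s.2.2.2.1.length = hm.length ∧ s.2.2.2.2.length = ex.length ∧
       (∀ j, s.2.2.2.1.getD j 0 =
          if j < i then hm.getD (anchor sec j) 0 else hm.getD j 0) ∧
       (∀ j, s.2.2.2.2.getD j 0 =
          if j < i then ex.getD (anchor sec j) 0 else ex.getD j 0)) := by
    intro i
    induction i with
    | zero => intro _; simp
    | succ k ih =>
      intro hk1
      have hk : k ≤ hm.length := by omega
      obtain ⟨hcar, hlen1, hlen2, hgetH, hgetE⟩ := ih hk
      rw [List.range_succ, List.foldl_append, List.foldl_cons, List.foldl_nil]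
      set s := (List.range k).foldl (fixStepA sec) (-1, 0, 0, hm, ex) with hs
      -- the captured pair after the step is the anchored original value
      have hklt : k < hm.length := by omega
      have hcap :
          (if s.1 ≠ sec.getD k 0 ∨ k % 4 = 0
           then (s.2.2.2.1.getD k 0, s.2.2.2.2.getD k 0) else (s.2.1, s.2.2.1))
          = (hm.getD (anchor sec k) 0, ex.getD (anchor sec k) 0) := by
        cases k with
        | zero =>
          rw [if_pos (Or.inr (by norm_num))]
          have h1 := hgetH 0
          have h2 := hgetE 0
          rw [if_neg (lt_irrefl 0)] at h1 h2
          rw [h1, h2]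
          simp [anchor]
        | succ m =>
          obtain ⟨hpre, hh, he⟩ := hcar (by omega)
          by_cases hc : (m + 1) % 4 = 0 ∨ sec.getD (m + 1) 0 ≠ sec.getD m 0
          · have hcond : s.1 ≠ sec.getD (m + 1) 0 ∨ (m + 1) % 4 = 0 := by
              rcases hc with h4 | hne
              · exact Or.inr h4
              · exact Or.inl (by rw [hpre]; simpa using fun h => hne h.symm)
            rw [if_pos hcond]
            have h1 := hgetH (m + 1)
            have h2 := hgetE (m + 1)
            rw [if_neg (lt_irrefl (m + 1))] at h1 h2
            rw [h1, h2, anchor, if_pos hc]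
          · have hcond : ¬ (s.1 ≠ sec.getD (m + 1) 0 ∨ (m + 1) % 4 = 0) := by
              push_neg at hc ⊢
              refine ⟨by rw [hpre]; simp; exact hc.2.symm, hc.1⟩
            rw [if_neg hcond, hh, he, anchor, if_neg hc]
            simp
      refine ⟨fun _ => ?_, ?_, ?_, ?_, ?_⟩
      · simp only [fixStepA, Nat.add_sub_cancel]
        rw [hcap]
        exact ⟨trivial, rfl, rfl⟩
      · simp [fixStepA, hlen1]
      · simp [fixStepA, hlen2]
      · intro j
        simp only [fixStepA]
        rw [hcap, getD_set, hgetH j]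
        rcases Nat.lt_trichotomy j k with h | rfl | h
        · rw [if_neg (by omega), if_pos h, if_pos (by omega)]
        · rw [if_pos ⟨rfl, by omega⟩, if_pos (by omega)]
        · rw [if_neg (by omega), if_neg (by omega), if_neg (by omega)]
      · intro j
        simp only [fixStepA]
        rw [hcap, getD_set, hgetE j]
        rcases Nat.lt_trichotomy j k with h | rfl | h
        · rw [if_neg (by omega), if_pos h, if_pos (by omega)]
        · rw [if_pos ⟨rfl, by omega⟩, if_pos (by omega)]
        · rw [if_neg (by omega), if_neg (by omega), if_neg (by omega)]

-- ===== VERDICT (by name: the statement is the Claim_ definition above) =====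
theorem fix_Auto_Hmm_spec : Claim_equal_fix_Auto_Hmm := by
  intro hm ex sec _ hpre
  obtain ⟨hex, -⟩ := hpre
  unfold Spec_fix_Auto_Hmm fix_Auto_Hmm fix_Auto_Hmm_alt
  obtain ⟨_, hlen1, hlen2, hgetH, hgetE⟩ := A_inv hm ex sec hex hm.length le_rfl
  rw [bAnchors_eq]
  set s := (List.range hm.length).foldl (fixStepA sec) (-1, 0, 0, hm, ex) with hs
  refine Prod.ext ?_ ?_
  · apply List.ext_getElem
    · simp [hlen1]
    · intro j h1 h2
      have hj : j < hm.length := by simpa [hlen1] using h1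
      have := hgetH j
      rw [if_pos hj] at this
      rw [← List.getD_eq_getElem _ 0 h1, this]
      simp [List.getD_eq_getElem?_getD]
  · apply List.ext_getElem
    · simp [hlen2]; omega
    · intro j h1 h2
      have hjex : j < ex.length := by simpa [hlen2] using h1
      have := hgetE j
      by_cases hj : j < hm.length
      · rw [if_pos hj] at this
        rw [← List.getD_eq_getElem _ 0 h1, this]
        rw [List.getElem_append_left (by simpa using hj)]
        simp [List.getD_eq_getElem?_getD]
      · rw [if_neg hj] at this
        rw [← List.getD_eq_getElem _ 0 h1, this]
        rw [List.getElem_append_right (by simpa using hj)]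
        simp only [List.length_map, List.length_range, List.getElem_drop]
        rw [List.getD_eq_getElem _ 0 (by omega)]
        congr 1
        omega
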